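-- pv_equiv track=rewrite | github.com/NikolaDeja/pp1 | 05-Test1/mock/p4.py | f
-- ===== SOURCE A (Python) =====
-- def f(cn):
--     w=""
--     for i in range(len(cn)):
--         if(1<i<12):
--             w+="*"
--         else:
--             w+=cn[i]
--     return w
-- ===== SOURCE B (Python) =====
-- def f(cn):
--     return cn[:2] + "*" * max(0, min(len(cn), 12) - 2) + cn[12:]
-- ===== Notes on version B (the rewrite author's own statement) =====
-- stated objective: faster
-- what changed: Replaces the per-index loop with repeated string concatenation by three slices and a closed-form mask count: unchanged head of length 2, a run of asterisks of length clamp(min(len,12)-2, >=0), unchanged tail from index 12.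
import Mathlib
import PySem

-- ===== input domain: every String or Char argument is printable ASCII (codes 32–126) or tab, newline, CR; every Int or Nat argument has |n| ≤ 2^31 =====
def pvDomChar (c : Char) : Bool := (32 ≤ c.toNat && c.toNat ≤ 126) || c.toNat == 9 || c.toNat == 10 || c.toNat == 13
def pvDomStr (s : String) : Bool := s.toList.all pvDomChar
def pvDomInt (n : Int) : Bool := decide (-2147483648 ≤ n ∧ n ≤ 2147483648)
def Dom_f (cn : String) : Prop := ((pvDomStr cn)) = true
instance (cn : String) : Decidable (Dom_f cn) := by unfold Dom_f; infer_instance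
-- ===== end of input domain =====

-- B masks indices 2..11 by slicing: cn[:2] + '*' * max(0, min(len(cn),12)-2) + cn[12:] (simpler: no per-character loop).

-- ===== PORT A =====
-- loop 'for i in range(len(cn))', appending '*' when 1 < i < 12, else cn[i]
def f (cn : String) : String :=
  String.mk
    ((PySem.List.pyRange 0 (PySem.Str.len cn) 1).foldl
      (fun w i =>
        if 1 < i ∧ i < 12 then w ++ ['*']
        else w ++ [PySem.List.pyGetD cn.toList i ' '])  -- i ∈ range(len), always in range
      [])

-- ===== PORT B =====
def f_alt (cn : String) : String :=
  String.mk
    (PySem.List.slice cn.toList none (some 2)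
      ++ List.replicate (max 0 (min (PySem.Str.len cn) 12 - 2)).toNat '*'
      ++ PySem.List.slice cn.toList (some 12) none)

-- ===== PRECONDITION & SPEC =====
def Spec_f (cn : String) (out : String) : Prop := out = f_alt cn
instance (cn : String) (out : String) : Decidable (Spec_f cn out) := by unfold Spec_f; infer_instance

-- ===== CLAIM (what is proved, stated in full; the proofs are below) =====
def Claim_equal_f : Prop := ∀ (cn : String), Dom_f cn → Spec_f cn (f cn)

-- ===== LEMMAS AND PROOFS =====

theorem mask_list_eq (l : List Char) :
    (List.range l.length).map
        (fun (k : Nat) => if 1 < (k : Int) ∧ (k : Int) < 12 then '*' else PySem.List.pyGetD l (k : Int) ' ')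
      = l.take 2 ++ List.replicate (min l.length 12 - 2) '*' ++ l.drop 12 := by
  apply List.ext_getElem
  · simp; omega
  · intro i h1 h2
    have hi : i < l.length := by simpa using h1
    have hget : PySem.List.pyGetD l (i : Int) ' ' = l[i] := by
      simp [List.getElem?_eq_getElem hi]
    rw [List.getElem_map, List.getElem_range, hget]
    by_cases h2i : i < 2
    · rw [if_neg (by omega), List.getElem_append_left, List.getElem_append_left,
        List.getElem_take]
      · simpa using by omega
      · simp; omega
    · by_cases h12 : i < 12
      · rw [if_pos (by omega), List.getElem_append_left, List.getElem_append_right,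
          List.getElem_replicate]
        · simp; omega
        · simp; omega
      · rw [if_neg (by omega), List.getElem_append_right, List.getElem_drop]
        · congr 1; simp; omega
        · simp; omega

-- ===== VERDICT (by name: the statement is the Claim_ definition above) =====
theorem f_spec : Claim_equal_f := by
  intro cn _
  unfold Spec_f f f_alt
  have hlen : PySem.Str.len cn = (cn.toList.length : Int) := by simp [PySem.Str.len_eq]
  rw [hlen]
  congr 1
  have hfun : (fun (w : List Char) (i : Int) =>
        if 1 < i ∧ i < 12 then w ++ ['*'] else w ++ [PySem.List.pyGetD cn.toList i ' '])
      = fun w i => w ++ [if 1 < i ∧ i < 12 then '*' else PySem.List.pyGetD cn.toList i ' '] := by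
    funext w i; split <;> rfl
  rw [hfun, PySem.List.pyRange_zero_natCast, PySem.List.foldl_append_singleton_eq_map]
  simp only [List.map_map, List.nil_append, Function.comp_def]
  rw [mask_list_eq cn.toList]
  congr 1
  · congr 1
    · simp [PySem.List.slice_to]
    · congr 1; omega
  · simp [PySem.List.slice_from]
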